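-- pv_equiv track=rewrite | github.com/scottpeterman/parsing_fire | tfsm2ttp/table.py | find_source_line
-- ===== SOURCE A (Python) =====
-- from typing import List, Dict, Tuple, Optional
--
-- def find_source_line(cli_lines: List[str], row_values: Dict[str, str]) -> Optional[Tuple[int, str]]:
--     """
--     Find the CLI line that contains all values from this row.
--     Returns (line_number, line_content) or None.
--     """
--     values = [v for v in row_values.values() if v and v.strip()]
--     if not values:
--         return None
--
--     for idx, line in enumerate(cli_lines):
--         if all(val in line for val in values):
--             return (idx, line)
--
--     # Fallback: find line with most matches
--     best_match = (0, None, "")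
--     for idx, line in enumerate(cli_lines):
--         match_count = sum(1 for val in values if val in line)
--         if match_count > best_match[0]:
--             best_match = (match_count, idx, line)
--
--     if best_match[1] is not None and best_match[0] >= 2:
--         return (best_match[1], best_match[2])
--
--     return None
-- ===== SOURCE B (Python) =====
-- def find_source_line(cli_lines, row_values):
--     values = [v for v in row_values.values() if v and v.strip()]
--     if not values:
--         return None
--     n = len(values)
--     best_count, best = 0, None
--     for idx, line in enumerate(cli_lines):
--         count = sum(1 for val in values if val in line)
--         if count == n:
--             return (idx, line)
--         if count > best_count:
--             best_count, best = count, (idx, line)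
--     return best if best_count >= 2 else None
-- ===== Notes on version B (the rewrite author's own statement) =====
-- stated objective: simpler
-- what changed: Replaces A's two separate scans (an all()-based full-match scan, then a best-count fallback scan) by a single pass that computes each line's match count once, returning immediately when count == len(values) and otherwise maintaining the running best.
import Mathlib
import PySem

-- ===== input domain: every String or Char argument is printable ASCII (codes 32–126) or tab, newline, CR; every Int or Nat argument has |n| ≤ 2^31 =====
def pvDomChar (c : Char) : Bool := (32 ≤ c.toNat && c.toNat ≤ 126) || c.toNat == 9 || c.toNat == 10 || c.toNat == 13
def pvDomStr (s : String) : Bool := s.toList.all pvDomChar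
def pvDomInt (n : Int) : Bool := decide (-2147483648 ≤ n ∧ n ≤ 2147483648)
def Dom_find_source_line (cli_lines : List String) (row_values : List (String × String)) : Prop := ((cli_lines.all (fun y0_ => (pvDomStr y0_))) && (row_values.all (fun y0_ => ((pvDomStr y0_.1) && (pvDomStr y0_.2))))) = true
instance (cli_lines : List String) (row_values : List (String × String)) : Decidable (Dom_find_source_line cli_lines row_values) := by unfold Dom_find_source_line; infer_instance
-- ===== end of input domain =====

-- B fuses A's two scans into one pass (per-line match count computed once); objective: simpler.

-- ===== PORT A =====
-- first loop: for idx, line in enumerate(cli_lines): if all(...): return (idx, line)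
def fslFirstLoop (cli_lines : List String) (values : List String) (idx : Int) :
    Option (Int × String) :=
  match cli_lines with
  | [] => none
  | l :: rest =>
    if values.all (fun val => PySem.Str.isIn val l) then some (idx, l)
    else fslFirstLoop rest values (idx + 1)

-- second loop: fold the best_match = (match_count, idx-or-None, line) triple
def fslBestLoop (cli_lines : List String) (values : List String) (idx : Int)
    (best : Int × Option Int × String) : Int × Option Int × String :=
  match cli_lines with
  | [] => best
  | l :: rest =>
    let c : Int := ((values.filter (fun val => PySem.Str.isIn val l)).length : Int)
    fslBestLoop rest values (idx + 1) (if best.1 < c then (c, some idx, l) else best)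

def find_source_line (cli_lines : List String) (row_values : List (String × String)) : Option (Int × String) :=
  -- values = [v for v in row_values.values() if v and v.strip()]
  let values := ((PySem.Dict.ofList row_values).values).filter
    (fun v => decide (v ≠ "") && decide (PySem.Str.strip v ≠ ""))
  if values = [] then none
  else
    match fslFirstLoop cli_lines values 0 with
    | some r => some r
    | none =>
      let best := fslBestLoop cli_lines values 0 (0, none, "")
      match best.2.1 with
      | some i => if 2 ≤ best.1 then some (i, best.2.2) else none
      | none => none

-- ===== PORT B =====
-- single pass: count once per line; full match returns immediately, else track best
def fslAltLoop (values : List String) (n : Int) (cli_lines : List String) (idx : Int)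
    (best_count : Int) (best : Option (Int × String)) : Option (Int × String) :=
  match cli_lines with
  | [] => if 2 ≤ best_count then best else none
  | l :: rest =>
    let c : Int := ((values.filter (fun val => PySem.Str.isIn val l)).length : Int)
    if c = n then some (idx, l)
    else if best_count < c then fslAltLoop values n rest (idx + 1) c (some (idx, l))
    else fslAltLoop values n rest (idx + 1) best_count best

def find_source_line_alt (cli_lines : List String) (row_values : List (String × String)) : Option (Int × String) :=
  let values := ((PySem.Dict.ofList row_values).values).filter
    (fun v => decide (v ≠ "") && decide (PySem.Str.strip v ≠ ""))
  if values = [] then none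
  else fslAltLoop values (values.length : Int) cli_lines 0 0 none

-- ===== PRECONDITION & SPEC =====
def Spec_find_source_line (cli_lines : List String) (row_values : List (String × String)) (out : Option (Int × String)) : Prop := out = find_source_line_alt cli_lines row_values
instance (cli_lines : List String) (row_values : List (String × String)) (out : Option (Int × String)) : Decidable (Spec_find_source_line cli_lines row_values out) := by unfold Spec_find_source_line; infer_instance

-- ===== CLAIM (what is proved, stated in full; the proofs are below) =====
def Claim_equal_find_source_line : Prop := ∀ (cli_lines : List String) (row_values : List (String × String)), Dom_find_source_line cli_lines row_values → Spec_find_source_line cli_lines row_values (find_source_line cli_lines row_values)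

-- ===== LEMMAS AND PROOFS =====

-- A's post-loop check, as a function of the best_match triple
def fslFinishA (best : Int × Option Int × String) : Option (Int × String) :=
  match best.2.1 with
  | some i => if 2 ≤ best.1 then some (i, best.2.2) else none
  | none => none

-- full match on a line ⟺ this line's match count equals len(values)
theorem fsl_count_eq_iff (values : List String) (l : String) :
    ((values.filter (fun val => PySem.Str.isIn val l)).length : Int) = (values.length : Int)
      ↔ values.all (fun val => PySem.Str.isIn val l) = true := by
  rw [Int.natCast_inj, List.length_filter_eq_length_iff, List.all_eq_true]

-- the fused loop computes "first full match, else A's best fallback"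
theorem fsl_loop_eq (values : List String) (cli_lines : List String) :
    ∀ (idx : Int) (bestA : Int × Option Int × String) (bc : Int) (b : Option (Int × String)),
      bestA.1 = bc → fslFinishA bestA = (if 2 ≤ bc then b else none) →
      (match fslFirstLoop cli_lines values idx with
       | some r => some r
       | none => fslFinishA (fslBestLoop cli_lines values idx bestA))
        = fslAltLoop values (values.length : Int) cli_lines idx bc b := by
  induction cli_lines with
  | nil =>
    intro idx bestA bc b h1 h2
    simpa [fslFirstLoop, fslBestLoop, fslAltLoop] using h2
  | cons l rest ih =>
    intro idx bestA bc b h1 h2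
    subst h1
    simp only [fslFirstLoop, fslAltLoop, fslBestLoop]
    by_cases hall : values.all (fun val => PySem.Str.isIn val l) = true
    · have hc : ((values.filter (fun val => PySem.Str.isIn val l)).length : Int)
          = (values.length : Int) := (fsl_count_eq_iff values l).2 hall
      rw [if_pos hall, if_pos hc]
    · have hc : ¬ ((values.filter (fun val => PySem.Str.isIn val l)).length : Int)
          = (values.length : Int) := fun h => hall ((fsl_count_eq_iff values l).1 h)
      rw [if_neg hall, if_neg hc]
      by_cases hlt : bestA.1 < ((values.filter (fun val => PySem.Str.isIn val l)).length : Int)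
      · rw [if_pos hlt, if_pos hlt]
        exact ih (idx + 1)
          (((values.filter (fun val => PySem.Str.isIn val l)).length : Int), some idx, l)
          (((values.filter (fun val => PySem.Str.isIn val l)).length : Int))
          (some (idx, l)) rfl rfl
      · rw [if_neg hlt, if_neg hlt]
        exact ih (idx + 1) bestA bestA.1 b rfl h2

-- ===== VERDICT (by name: the statement is the Claim_ definition above) =====
theorem find_source_line_spec : Claim_equal_find_source_line := by
  intro cli_lines row_values _
  unfold Spec_find_source_line find_source_line find_source_line_alt
  by_cases hv : ((PySem.Dict.ofList row_values).values).filter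
      (fun v => decide (v ≠ "") && decide (PySem.Str.strip v ≠ "")) = []
  · simp only [hv]
    rfl
  · simp only [if_neg hv]
    exact fsl_loop_eq
      (((PySem.Dict.ofList row_values).values).filter
        (fun v => decide (v ≠ "") && decide (PySem.Str.strip v ≠ "")))
      cli_lines 0 (0, none, "") 0 none rfl (by simp [fslFinishA])
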